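-- pv_equiv track=rewrite | github.com/Uszczi/travel-map | travel_map/services/elevation.py | calculate_total_gain_lose
-- ===== SOURCE A (Python) =====
-- def calculate_total_gain_lose(elevation: list[int]) -> tuple[int, int]:
--     total_gain = 0
--     total_lose = 0
--     for i, j in zip(elevation[:-1], elevation[1:]):
--         diff = j - i
--
--         if diff > 0:
--             total_gain += diff
--         elif diff < 0:
--             total_lose += abs(diff)
--
--     return total_gain, total_lose
-- ===== SOURCE B (Python) =====
-- def calculate_total_gain_lose(elevation: list[int]) -> tuple[int, int]:
--     if not elevation:
--         return 0, 0
--     gain = 0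
--     prev = elevation[0]
--     for cur in elevation[1:]:
--         d = cur - prev
--         if d > 0:
--             gain += d
--         prev = cur
--     # signed diffs telescope: gain - lose == elevation[-1] - elevation[0]
--     return gain, gain - (elevation[-1] - elevation[0])
-- ===== Notes on version B (the rewrite author's own statement) =====
-- stated objective: alternative
-- what changed: B tracks only the positive gains in one accumulator over the list and recovers the loss from the telescoping identity (gain minus loss equals last element minus first element), instead of A's two-accumulator scan over a zip of two sliced copies of the list.
import Mathlib
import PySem

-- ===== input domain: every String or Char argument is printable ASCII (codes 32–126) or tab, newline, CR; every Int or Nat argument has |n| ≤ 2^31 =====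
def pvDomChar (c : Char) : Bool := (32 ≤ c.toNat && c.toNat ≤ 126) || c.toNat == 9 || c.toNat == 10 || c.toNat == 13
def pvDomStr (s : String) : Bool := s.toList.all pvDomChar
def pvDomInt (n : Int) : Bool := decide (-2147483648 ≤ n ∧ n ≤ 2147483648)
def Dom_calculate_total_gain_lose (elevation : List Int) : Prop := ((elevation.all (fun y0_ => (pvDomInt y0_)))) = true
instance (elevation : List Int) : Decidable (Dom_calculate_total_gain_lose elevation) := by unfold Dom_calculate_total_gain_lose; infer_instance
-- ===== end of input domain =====

-- B tracks only the positive gains and derives the loss from the telescoping identity; same O(n) cost, different decomposition.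

-- ===== PORT A =====
-- for i, j in zip(elevation[:-1], elevation[1:]): two accumulators (total_gain, total_lose)
def calculate_total_gain_lose (elevation : List Int) : Int × Int :=
  ((PySem.List.slice elevation none (some (-1))).zip
      (PySem.List.slice elevation (some 1) none)).foldl
    (fun (acc : Int × Int) ij =>
      let diff := ij.2 - ij.1
      if diff > 0 then (acc.1 + diff, acc.2)
      else if diff < 0 then (acc.1, acc.2 + |diff|)
      else acc)
    (0, 0)

-- ===== PORT B =====
-- the 'for cur in elevation[1:]' loop of Source B: state is (gain, prev)
def pvGainLoop (gain prev : Int) : List Int → Int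
  | [] => gain
  | cur :: rest => pvGainLoop (if cur - prev > 0 then gain + (cur - prev) else gain) cur rest

def calculate_total_gain_lose_alt (elevation : List Int) : Int × Int :=
  match elevation with
  | [] => (0, 0)
  | x :: xs =>
    let gain := pvGainLoop 0 x xs
    (gain, gain - ((x :: xs).getLast (List.cons_ne_nil _ _) - x))

-- ===== PRECONDITION & SPEC =====
def Spec_calculate_total_gain_lose (elevation : List Int) (out : Int × Int) : Prop := out = calculate_total_gain_lose_alt elevation
instance (elevation : List Int) (out : Int × Int) : Decidable (Spec_calculate_total_gain_lose elevation out) := by unfold Spec_calculate_total_gain_lose; infer_instance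

-- ===== CLAIM (what is proved, stated in full; the proofs are below) =====
def Claim_equal_calculate_total_gain_lose : Prop := ∀ (elevation : List Int), Dom_calculate_total_gain_lose elevation → Spec_calculate_total_gain_lose elevation (calculate_total_gain_lose elevation)

-- ===== LEMMAS AND PROOFS =====

theorem pvGainLoop_acc (xs : List Int) : ∀ (g p : Int), pvGainLoop g p xs = g + pvGainLoop 0 p xs := by
  induction xs with
  | nil => intro g p; simp [pvGainLoop]
  | cons c r ih =>
    intro g p
    simp only [pvGainLoop]
    rw [ih, ih (if c - p > 0 then 0 + (c - p) else 0)]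
    split_ifs <;> ring

theorem pv_key (xs : List Int) : ∀ (prev g l : Int),
    (((prev :: xs).dropLast.zip (prev :: xs).tail).foldl
      (fun (acc : Int × Int) ij =>
        let diff := ij.2 - ij.1
        if diff > 0 then (acc.1 + diff, acc.2)
        else if diff < 0 then (acc.1, acc.2 + |diff|)
        else acc)
      (g, l))
    = (g + pvGainLoop 0 prev xs,
       l + (pvGainLoop 0 prev xs - ((prev :: xs).getLast (List.cons_ne_nil _ _) - prev))) := by
  induction xs with
  | nil => intro prev g l; simp [pvGainLoop]
  | cons c r ih =>
    intro prev g l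
    have hz : (prev :: c :: r).dropLast.zip (prev :: c :: r).tail
        = (prev, c) :: ((c :: r).dropLast.zip (c :: r).tail) := by
      cases r <;> simp [List.dropLast]
    have hlast : (prev :: c :: r).getLast (List.cons_ne_nil _ _)
        = (c :: r).getLast (List.cons_ne_nil _ _) := List.getLast_cons _
    rw [hz, List.foldl_cons, hlast]
    dsimp only
    simp only [pvGainLoop]
    rw [pvGainLoop_acc r]
    split_ifs with h1 h2
    · rw [ih c]
      simp only [Prod.mk.injEq]
      exact ⟨by ring, by ring⟩
    · rw [ih c]
      simp only [Prod.mk.injEq]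
      rw [abs_of_neg h2]
      exact ⟨by ring, by ring⟩
    · rw [ih c]
      simp only [Prod.mk.injEq]
      have hc : c = prev := by omega
      rw [hc]
      exact ⟨by ring, by ring⟩

-- ===== VERDICT (by name: the statement is the Claim_ definition above) =====
theorem calculate_total_gain_lose_spec : Claim_equal_calculate_total_gain_lose := by
  intro elevation _
  unfold Spec_calculate_total_gain_lose calculate_total_gain_lose calculate_total_gain_lose_alt
  rw [PySem.List.slice_to_neg_one, PySem.List.slice_from_one]
  cases elevation with
  | nil => rfl
  | cons x xs =>
    rw [pv_key xs x 0 0]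
    simp
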